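-- pv_equiv track=rewrite | github.com/amber-r-edwards/ZineOCR | ocr_processing.py | remove_tesseract_header
-- ===== SOURCE A (Python) =====
-- def remove_tesseract_header(text):
--     """
--     Remove common Tesseract header information from OCR text.
--
--     Args:
--         text (str): Raw OCR text
--
--     Returns:
--         str: Text with headers removed
--     """
--     lines = text.split('\n')
--
--     # Skip lines that look like headers
--     filtered_lines = []
--     skip_patterns = [
--         'OCR Results',
--         'Image:',
--         'Word count:',
--         'Confidence:',
--         '--------------------------------------------------',
--         '================',
--     ]
--
--     for line in lines:
--         # Skip empty lines at the start
--         if not filtered_lines and not line.strip():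
--             continue
--
--         # Skip header patterns
--         if any(pattern in line for pattern in skip_patterns):
--             continue
--
--         filtered_lines.append(line)
--
--     return '\n'.join(filtered_lines)
-- ===== SOURCE B (Python) =====
-- def remove_tesseract_header(text):
--     """
--     Remove common Tesseract header information from OCR text.
--     Two-phase: filter out header-pattern lines, then strip leading blank lines.
--     """
--     skip_patterns = [
--         'OCR Results',
--         'Image:',
--         'Word count:',
--         'Confidence:',
--         '--------------------------------------------------',
--         '================',
--     ]
--     filtered = [line for line in text.split('\n')
--                 if not any(p in line for p in skip_patterns)]
--     i = 0
--     while i < len(filtered) and not filtered[i].strip():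
--         i += 1
--     return '\n'.join(filtered[i:])
-- ===== Notes on version B (the rewrite author's own statement) =====
-- stated objective: alternative
-- what changed: Replaced A's single stateful loop (whose empty-accumulator gate interleaves leading-blank skipping with header skipping) by two separate passes: a header filter over all lines, then an index scan that drops leading blank lines of the filtered list.
import Mathlib
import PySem

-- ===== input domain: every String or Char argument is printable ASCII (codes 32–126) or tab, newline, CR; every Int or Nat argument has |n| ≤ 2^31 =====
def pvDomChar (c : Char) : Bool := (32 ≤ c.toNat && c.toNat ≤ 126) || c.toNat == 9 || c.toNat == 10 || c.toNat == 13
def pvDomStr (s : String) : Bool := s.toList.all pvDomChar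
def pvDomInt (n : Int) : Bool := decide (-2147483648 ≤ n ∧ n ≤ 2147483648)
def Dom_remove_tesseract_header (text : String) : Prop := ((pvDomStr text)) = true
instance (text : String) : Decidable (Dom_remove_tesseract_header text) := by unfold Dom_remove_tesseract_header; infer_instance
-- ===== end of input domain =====

-- B restructures A's single stateful loop into two passes (header filter, then drop
-- leading blank lines); objective: alternative decomposition, same cost.

-- ===== PORT A =====
-- the skip_patterns list, shared verbatim by both Pythons
def pvSkipPatterns : List String :=
  ["OCR Results", "Image:", "Word count:", "Confidence:",
   "--------------------------------------------------", "================"]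

-- any(pattern in line for pattern in skip_patterns)
def pvIsHeader (line : String) : Bool :=
  pvSkipPatterns.any (fun p => PySem.Str.isIn p line)

-- A's for-loop over the lines with the filtered_lines accumulator
def pvLoopA : List String → List String → List String
  | [], acc => acc
  | l :: ls, acc =>
      if acc.isEmpty && (PySem.Str.strip l == "") then pvLoopA ls acc
      else if pvIsHeader l then pvLoopA ls acc
      else pvLoopA ls (acc ++ [l])

def remove_tesseract_header (text : String) : String :=
  PySem.Str.join "\n" (pvLoopA ((PySem.Str.split? text "\n").getD []) [])

-- ===== PORT B =====
def remove_tesseract_header_alt (text : String) : String :=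
  let filtered : List String := ((PySem.Str.split? text "\n").getD []).filter (fun l => !(pvIsHeader l))
  -- the index-advance while loop + filtered[i:] = drop the leading blank lines
  PySem.Str.join "\n" (filtered.dropWhile (fun l => PySem.Str.strip l == ""))

-- ===== PRECONDITION & SPEC =====
def Spec_remove_tesseract_header (text : String) (out : String) : Prop := out = remove_tesseract_header_alt text
instance (text : String) (out : String) : Decidable (Spec_remove_tesseract_header text out) := by unfold Spec_remove_tesseract_header; infer_instance

-- ===== CLAIM (what is proved, stated in full; the proofs are below) =====
def Claim_equal_remove_tesseract_header : Prop := ∀ (text : String), Dom_remove_tesseract_header text → Spec_remove_tesseract_header text (remove_tesseract_header text)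

-- ===== LEMMAS AND PROOFS =====

-- once the accumulator is non-empty, A's loop just appends every non-header line
theorem pvLoopA_ne_nil (ls : List String) :
    ∀ acc : List String, acc ≠ [] →
      pvLoopA ls acc = acc ++ ls.filter (fun l => !(pvIsHeader l)) := by
  induction ls with
  | nil => intro acc _; simp [pvLoopA]
  | cons l ls ih =>
      intro acc hacc
      have hne : acc.isEmpty = false := by
        cases acc with
        | nil => exact absurd rfl hacc
        | cons a as => simp
      simp only [pvLoopA, hne, Bool.false_and]
      by_cases h : pvIsHeader l = true
      · simp [h, ih acc hacc, List.filter]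
      · rw [Bool.not_eq_true] at h
        simp [h, ih (acc ++ [l]) (by simp), List.filter]

-- starting empty, A's loop is the filter followed by dropping leading blanks
theorem pvLoopA_nil (ls : List String) :
    pvLoopA ls [] =
      (ls.filter (fun l => !(pvIsHeader l))).dropWhile
        (fun l => PySem.Str.strip l == "") := by
  induction ls with
  | nil => simp [pvLoopA]
  | cons l ls ih =>
      by_cases hb : (PySem.Str.strip l == "") = true
      · -- blank line while the accumulator is empty: skipped either way
        simp only [pvLoopA, List.isEmpty_nil, hb, Bool.and_self, if_true]
        by_cases hh : pvIsHeader l = true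
        · simp [List.filter, hh, ih]
        · rw [Bool.not_eq_true] at hh
          simp [List.filter, hh, hb, ih]
      · -- non-blank line
        rw [Bool.not_eq_true] at hb
        simp only [pvLoopA, List.isEmpty_nil, Bool.true_and, hb, Bool.false_eq_true, if_false]
        by_cases hh : pvIsHeader l = true
        · simp [hh, List.filter, ih]
        · rw [Bool.not_eq_true] at hh
          rw [hh, if_neg (by simp), List.nil_append, pvLoopA_ne_nil ls [l] (by simp)]
          simp [List.filter, hh, hb]

-- ===== VERDICT (by name: the statement is the Claim_ definition above) =====
theorem remove_tesseract_header_spec : Claim_equal_remove_tesseract_header := by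
  intro text _
  unfold Spec_remove_tesseract_header remove_tesseract_header remove_tesseract_header_alt
  rw [pvLoopA_nil]
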